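-- pv_equiv track=rewrite | github.com/andrewdieu/DiffFromZero | DiffFromZero.py | ndigitsnotzero
-- ===== SOURCE A (Python) =====
-- def ndigitsnotzero(value):
--     count = 0
--     while value > 0:
--         remainder = value % 10
--         value = value // 10
--         if remainder != 0:
--             count = count + 1
--     return count
-- ===== SOURCE B (Python) =====
-- def ndigitsnotzero(value):
--     if value <= 0:
--         return 0
--     return sum(1 for c in str(value) if c != '0')
-- ===== Notes on version B (the rewrite author's own statement) =====
-- stated objective: idiomatic
-- what changed: B converts the number to its decimal string and counts non-zero characters instead of peeling digits arithmetically with modulo and floor division in a while-loop.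
import Mathlib
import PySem

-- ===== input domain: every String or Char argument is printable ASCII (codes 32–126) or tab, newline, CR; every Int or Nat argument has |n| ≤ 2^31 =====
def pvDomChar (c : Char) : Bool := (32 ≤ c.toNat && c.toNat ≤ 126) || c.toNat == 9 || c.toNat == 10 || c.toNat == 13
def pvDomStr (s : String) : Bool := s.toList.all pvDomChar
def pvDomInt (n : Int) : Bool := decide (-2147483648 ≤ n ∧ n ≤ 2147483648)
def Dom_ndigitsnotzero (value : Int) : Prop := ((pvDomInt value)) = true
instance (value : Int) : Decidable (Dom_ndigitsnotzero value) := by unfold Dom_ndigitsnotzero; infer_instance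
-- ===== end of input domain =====

-- B counts non-'0' characters of the decimal string instead of A's %10 / //10 loop; objective: idiomatic.

-- ===== PORT A =====
-- the while-loop of A, carrying (value, count)
def ndigitsnotzeroGo (value count : Int) : Int :=
  if h : value > 0 then
    let remainder := PySem.Int.mod value 10
    let value' := PySem.Int.floordiv value 10
    ndigitsnotzeroGo value' (if remainder ≠ 0 then count + 1 else count)
  else count
termination_by value.toNat
decreasing_by
  rw [PySem.Int.floordiv_eq_ediv_of_pos (by norm_num)]
  omega

def ndigitsnotzero (value : Int) : Int := ndigitsnotzeroGo value 0

-- ===== PORT B =====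
def ndigitsnotzero_alt (value : Int) : Int :=
  if value ≤ 0 then 0
  else ((PySem.Int.toChars value).countP (fun c => c ≠ '0') : Int)

-- ===== PRECONDITION & SPEC =====
def Spec_ndigitsnotzero (value : Int) (out : Int) : Prop := out = ndigitsnotzero_alt value
instance (value : Int) (out : Int) : Decidable (Spec_ndigitsnotzero value out) := by unfold Spec_ndigitsnotzero; infer_instance

-- ===== CLAIM (what is proved, stated in full; the proofs are below) =====
def Claim_equal_ndigitsnotzero : Prop := ∀ (value : Int), Dom_ndigitsnotzero value → Spec_ndigitsnotzero value (ndigitsnotzero value)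

-- ===== LEMMAS AND PROOFS =====

-- number of nonzero decimal digits of a natural number (proof-side reference function)
def nzDigits (m : Nat) : Nat :=
  if m = 0 then 0
  else (if m % 10 ≠ 0 then 1 else 0) + nzDigits (m / 10)
decreasing_by omega

lemma nzDigits_zero : nzDigits 0 = 0 := by rw [nzDigits]; simp

lemma nzDigits_eq (m : Nat) :
    nzDigits m = if m = 0 then 0 else (if m % 10 ≠ 0 then 1 else 0) + nzDigits (m / 10) := by
  conv_lhs => rw [nzDigits]

lemma countP_cons_digit (d : Nat) (hd : d < 10) (ds : List Char) :
    (Nat.digitChar d :: ds).countP (fun c => c ≠ '0')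
      = (if d = 0 then 0 else 1) + ds.countP (fun c => c ≠ '0') := by
  rw [List.countP_cons]
  by_cases hz : d = 0
  · subst hz; simp [Nat.digitChar]
  · have hne : Nat.digitChar d ≠ '0' := by interval_cases d <;> first | omega | decide
    simp [hne, hz]
    omega

lemma countP_toDigitsCore (fuel n : Nat) (ds : List Char) (h : n ≤ fuel) :
    (Nat.toDigitsCore 10 (fuel + 1) n ds).countP (fun c => c ≠ '0')
      = nzDigits n + ds.countP (fun c => c ≠ '0') := by
  induction fuel generalizing n ds with
  | zero =>
    have hn : n = 0 := by omega
    subst hn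
    rw [Nat.toDigitsCore]
    simp only [Nat.zero_div, reduceIte, Nat.zero_mod]
    rw [countP_cons_digit 0 (by norm_num), nzDigits_zero]
    simp
  | succ fuel ih =>
    rw [Nat.toDigitsCore]
    by_cases h10 : n / 10 = 0
    · rw [if_pos h10, countP_cons_digit _ (by omega), nzDigits_eq n]
      rw [h10, nzDigits_zero]
      split_ifs <;> omega
    · rw [if_neg h10, ih (n / 10) _ (by omega), countP_cons_digit _ (by omega),
        nzDigits_eq n, if_neg (by omega : ¬ n = 0)]
      split_ifs <;> omega

lemma countP_toDigits (n : Nat) :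
    (Nat.toDigits 10 n).countP (fun c => c ≠ '0') = nzDigits n := by
  have := countP_toDigitsCore n n [] le_rfl
  simpa [Nat.toDigits] using this

lemma go_eq_nzDigits (m : Nat) : ∀ c : Int, ndigitsnotzeroGo (m : Int) c = c + (nzDigits m : Int) := by
  induction m using Nat.strong_induction_on with
  | _ m ih =>
    intro c
    rw [ndigitsnotzeroGo]
    by_cases hm : m = 0
    · subst hm; simp [nzDigits_zero]
    · have hpos : ((m : Int) > 0) := by exact_mod_cast Nat.pos_of_ne_zero hm
      rw [dif_pos hpos]
      have hf : PySem.Int.floordiv (m : Int) 10 = ((m / 10 : Nat) : Int) := by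
        exact_mod_cast PySem.Int.floordiv_natCast m 10
      have hmod : PySem.Int.mod (m : Int) 10 = ((m % 10 : Nat) : Int) := by
        exact_mod_cast PySem.Int.mod_natCast m 10
      rw [hf, hmod, ih (m / 10) (by omega), nzDigits_eq m, if_neg hm]
      have hiff : (((m % 10 : Nat) : Int) ≠ 0) ↔ (m % 10 ≠ 0) := by
        constructor <;> intro hx <;> exact_mod_cast hx
      by_cases hz : m % 10 = 0
      · simp [hz]
      · rw [if_pos (hiff.mpr hz), if_pos hz]
        push_cast
        ring

-- ===== VERDICT (by name: the statement is the Claim_ definition above) =====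
theorem ndigitsnotzero_spec : Claim_equal_ndigitsnotzero := by
  intro value _
  unfold Spec_ndigitsnotzero ndigitsnotzero ndigitsnotzero_alt
  by_cases hle : value ≤ 0
  · rw [if_pos hle, ndigitsnotzeroGo, dif_neg (by omega)]
  · rw [if_neg hle]
    have hv : value = (value.toNat : Int) := by omega
    rw [hv, go_eq_nzDigits, PySem.Int.toChars,
      if_neg (by omega : ¬ (value.toNat : Int) < 0), Int.toNat_natCast,
      countP_toDigits]
    simp
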